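-- pv_equiv track=rewrite | github.com/hottunasandwich/maktab-python-hw | 2/5.py | sentence_spliter
-- ===== SOURCE A (Python) =====
-- allowed_chars = 'abcdefghijklmnopqrstuvwxyz1234567890'
--
-- def sentence_spliter(sentence):
--     first_letters = ''
--     ready_to_catch_word = True
--     for letter in sentence:
--         if letter.lower() in allowed_chars and ready_to_catch_word == True:
--             first_letters += letter.upper()
--             ready_to_catch_word = False
--         elif letter.lower() not in allowed_chars and ready_to_catch_word == False:
--             ready_to_catch_word = True
--     return first_letters
-- ===== SOURCE B (Python) =====
-- allowed_chars = 'abcdefghijklmnopqrstuvwxyz1234567890'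
--
-- def sentence_spliter(sentence):
--     # staged passes: blank out separators, tokenize with str.split, map word heads
--     normalized = ''.join(c if c.lower() in allowed_chars else ' ' for c in sentence)
--     return ''.join(w[0].upper() for w in normalized.split())
-- ===== Notes on version B (the rewrite author's own statement) =====
-- stated objective: alternative
-- what changed: Replaces A's single-pass ready_to_catch_word flag machine with staged passes: first normalize the string by blanking every non-allowed character, then tokenize it with str.split(), then join the uppercased first character of each token.
import Mathlib
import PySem

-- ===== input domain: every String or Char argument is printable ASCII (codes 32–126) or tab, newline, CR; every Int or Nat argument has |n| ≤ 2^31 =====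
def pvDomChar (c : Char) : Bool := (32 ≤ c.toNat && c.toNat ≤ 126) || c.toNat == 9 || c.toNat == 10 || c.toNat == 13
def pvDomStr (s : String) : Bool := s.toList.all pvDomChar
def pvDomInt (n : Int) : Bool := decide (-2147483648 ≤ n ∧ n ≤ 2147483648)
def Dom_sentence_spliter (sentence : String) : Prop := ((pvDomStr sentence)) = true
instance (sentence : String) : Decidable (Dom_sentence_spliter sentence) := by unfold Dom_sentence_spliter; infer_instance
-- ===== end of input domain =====

-- B replaces A's single-pass flag machine by staged passes: blank out separators, tokenize with str.split(), map the word heads (alternative decomposition, same cost).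


-- ===== PORT A =====
-- allowed_chars = 'abcdefghijklmnopqrstuvwxyz1234567890'
def pvAllowed : List Char := "abcdefghijklmnopqrstuvwxyz1234567890".toList

-- letter.lower() in allowed_chars  (Python substring 'in'; letter is one char)
def pvOk (letter : Char) : Bool :=
  PySem.Chars.isIn [PySem.Chars.lowerChar letter] pvAllowed

-- one iteration of A's for-loop over state (first_letters, ready_to_catch_word)
def pvAStep (st : List Char × Bool) (letter : Char) : List Char × Bool :=
  if pvOk letter && st.2 then
    (st.1 ++ [PySem.Chars.upperChar letter], false)
  else if !(pvOk letter) && !st.2 then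
    (st.1, true)
  else st

def sentence_spliter (sentence : String) : String :=
  String.ofList (sentence.toList.foldl pvAStep ([], true)).1

-- ===== PORT B =====
-- c if c.lower() in allowed_chars else ' '
def pvNorm (c : Char) : Char := if pvOk c then c else ' '

-- ''.join(w[0].upper() for w in normalized.split()); split() never yields '' so w[0] is w's head
def sentence_spliter_alt (sentence : String) : String :=
  let normalized := sentence.toList.map pvNorm
  String.ofList (PySem.Chars.join []
    ((PySem.Chars.split₀ normalized).map (fun w => (w.take 1).map PySem.Chars.upperChar)))

-- ===== PRECONDITION & SPEC =====
def Spec_sentence_spliter (sentence : String) (out : String) : Prop := out = sentence_spliter_alt sentence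
instance (sentence : String) (out : String) : Decidable (Spec_sentence_spliter sentence out) := by unfold Spec_sentence_spliter; infer_instance

-- ===== CLAIM (what is proved, stated in full; the proofs are below) =====
def Claim_equal_sentence_spliter : Prop := ∀ (sentence : String), Dom_sentence_spliter sentence → Spec_sentence_spliter sentence (sentence_spliter sentence)

-- ===== LEMMAS AND PROOFS =====

-- the common specification: uppercased word heads of the rest, given the current flag
def pvG : Bool → List Char → List Char
  | _, [] => []
  | flag, c :: rest =>
      (if pvOk c && flag then [PySem.Chars.upperChar c] else []) ++ pvG (!pvOk c) rest

-- A's step in closed form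
theorem pvAStep_eq (acc : List Char) (flag : Bool) (c : Char) :
    pvAStep (acc, flag) c =
      (acc ++ (if pvOk c && flag then [PySem.Chars.upperChar c] else []), !pvOk c) := by
  cases hok : pvOk c <;> cases flag <;> simp [pvAStep, hok]

theorem pvA_foldl (l : List Char) (acc : List Char) (flag : Bool) :
    (l.foldl pvAStep (acc, flag)).1 = acc ++ pvG flag l := by
  induction l generalizing acc flag with
  | nil => simp [pvG]
  | cons c rest ih =>
      rw [List.foldl_cons, pvAStep_eq, ih, pvG, List.append_assoc]

-- an allowed character is never whitespace
theorem pvOk_not_isspace (c : Char) (h : pvOk c = true) : PySem.Chars.isspace c = false := by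
  cases hu : PySem.Chars.isupper c with
  | true =>
      have h2 : 65 ≤ c.toNat ∧ c.toNat ≤ 90 := by
        simpa [PySem.Chars.isupper] using hu
      simp [PySem.Chars.isspace]
      omega
  | false =>
      have hlc : PySem.Chars.lowerChar c = c := by
        simp [PySem.Chars.lowerChar, hu]
      have hmem : c ∈ pvAllowed := by
        have hinf : [PySem.Chars.lowerChar c] <:+: pvAllowed :=
          (PySem.Chars.isIn_iff_infix _ _).mp h
        rw [hlc] at hinf
        exact hinf.subset (List.mem_singleton_self c)
      have hb : (pvAllowed.all fun x => decide ((97 ≤ x.toNat ∧ x.toNat ≤ 122) ∨ (48 ≤ x.toNat ∧ x.toNat ≤ 57))) = true := by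
        decide
      have := List.all_eq_true.mp hb c hmem
      simp only [decide_eq_true_eq] at this
      simp [PySem.Chars.isspace]
      omega

theorem isspace_pvNorm (c : Char) : PySem.Chars.isspace (pvNorm c) = !pvOk c := by
  cases h : pvOk c with
  | true => simp [pvNorm, h, pvOk_not_isspace c h]
  | false => simp [pvNorm, h]; decide

-- uppercased heads of a list of words
def pvH (ws : List (List Char)) : List Char :=
  (ws.map (fun w => (w.take 1).map PySem.Chars.upperChar)).flatten

theorem pvTakeOne {α : Type} (xs : List α) (a : α) (t : List α) :
    (xs ++ a :: t).take 1 = (xs ++ [a]).take 1 := by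
  cases xs <;> simp

theorem pvGo_spec (l cur : List Char) (acc : List (List Char)) :
    pvH (PySem.Chars.split₀.go (l.map pvNorm) cur acc) =
      pvH acc.reverse ++ (cur.reverse.take 1).map PySem.Chars.upperChar ++ pvG cur.isEmpty l := by
  induction l generalizing cur acc with
  | nil =>
      cases cur with
      | nil => simp [PySem.Chars.split₀.go, pvG]
      | cons d ds => simp [PySem.Chars.split₀.go, pvG, pvH]
  | cons c rest ih =>
      cases hok : pvOk c with
      | false =>
          cases cur with
          | nil =>
              have hred : PySem.Chars.split₀.go ((c :: rest).map pvNorm) [] acc =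
                  PySem.Chars.split₀.go (rest.map pvNorm) [] acc := by
                simp [PySem.Chars.split₀.go, isspace_pvNorm, hok]
              rw [hred, ih]
              simp [pvG, hok]
          | cons d ds =>
              have hred : PySem.Chars.split₀.go ((c :: rest).map pvNorm) (d :: ds) acc =
                  PySem.Chars.split₀.go (rest.map pvNorm) [] ((d :: ds).reverse :: acc) := by
                simp [PySem.Chars.split₀.go, isspace_pvNorm, hok]
              rw [hred, ih]
              simp [pvG, hok, pvH]
      | true =>
          have hred : PySem.Chars.split₀.go ((c :: rest).map pvNorm) cur acc =
              PySem.Chars.split₀.go (rest.map pvNorm) (c :: cur) acc := by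
            simp [PySem.Chars.split₀.go, pvNorm, hok, pvOk_not_isspace c hok]
          rw [hred, ih]
          cases cur with
          | nil => simp [pvG, hok]
          | cons d ds =>
              simp only [List.reverse_cons, List.isEmpty_cons, pvG, hok]
              simp [pvTakeOne]

theorem pvJoin_nil (ws : List (List Char)) : PySem.Chars.join [] ws = ws.flatten := by
  simp only [PySem.Chars.join, List.intercalate]
  induction ws with
  | nil => simp
  | cons w ws ih => cases ws <;> simp_all [List.intersperse]

-- ===== VERDICT (by name: the statement is the Claim_ definition above) =====
theorem sentence_spliter_spec : Claim_equal_sentence_spliter := by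
  intro s _
  show String.ofList _ = _
  rw [pvA_foldl s.toList [] true]
  simp only [sentence_spliter_alt, PySem.Chars.split₀, pvJoin_nil]
  have := pvGo_spec s.toList [] []
  simp only [pvH] at this
  rw [this]
  simp
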